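-- pv_equiv track=rewrite | github.com/AP-MI-2021/lab-4-waterAddicted | main.py | inlcuire_palindoame_a_elem_div_cu_list3
-- ===== SOURCE A (Python) =====
-- def get_oglindit(nr):
--     '''
--     Creeza oglinditul unui numar.
--     :param nr: numarul
--     :return: numarul oglindit
--     '''
--     oglindit = 0
--
--     while nr > 0:
--         oglindit = oglindit * 10 + nr % 10
--         nr = nr // 10
--
--     return oglindit
--
-- def inlcuire_palindoame_a_elem_div_cu_list3(list1,list2,list3):
--     '''
--     Verifica daca elementele din primele doua liste unst divizibile cu toate elementele din a treia lista,iar in caz afirmativ le inverseaza.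
--     :param list1: prima lista
--     :param list2: a doua lista
--     :param list3: lista cu divizori
--     :return: un touple format din doua liste
--     '''
--     result_list1 = []
--     result_list2 = []
--     for i in range(0,len(list1)):
--         dev = True
--         for j in range(0,len(list3)):
--             if list1[i]%list3[j] != 0:
--                 dev = False
--         if dev == True:
--             result_list1.append(get_oglindit(list1[i]))
--         else:
--             result_list1.append(list1[i])
--
--     for i in range(0,len(list2)):
--         dev = True
--         for j in range(0,len(list3)):
--             if list2[i]%list3[j] != 0:
--                 dev = False
--         if dev == True:
--             result_list2.append(get_oglindit(list2[i]))
--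
--         else:
--             result_list2.append(list2[i])
--
--     return (result_list1,result_list2)
-- ===== SOURCE B (Python) =====
-- def _gcd(a, b):
--     while b:
--         a, b = b, a % b
--     return a
--
-- def _rev(nr, acc=0):
--     if nr <= 0:
--         return acc
--     return _rev(nr // 10, acc * 10 + nr % 10)
--
-- def inlcuire_palindoame_a_elem_div_cu_list3(list1, list2, list3):
--     # precompute the lcm of the divisors: one divisibility test per element
--     l = 1
--     for d in list3:
--         d = abs(d)
--         l = l * d // _gcd(l, d) if d else 0
--     conv = lambda x: _rev(x) if x % l == 0 else x
--     return ([conv(x) for x in list1], [conv(x) for x in list2])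
-- ===== Notes on version B (the rewrite author's own statement) =====
-- stated objective: faster
-- what changed: B precomputes the lcm of the divisor list once (Euclid's gcd), so each element needs a single divisibility test instead of A's inner scan over list3, and digit reversal is tail-recursive instead of a while loop.
import Mathlib
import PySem

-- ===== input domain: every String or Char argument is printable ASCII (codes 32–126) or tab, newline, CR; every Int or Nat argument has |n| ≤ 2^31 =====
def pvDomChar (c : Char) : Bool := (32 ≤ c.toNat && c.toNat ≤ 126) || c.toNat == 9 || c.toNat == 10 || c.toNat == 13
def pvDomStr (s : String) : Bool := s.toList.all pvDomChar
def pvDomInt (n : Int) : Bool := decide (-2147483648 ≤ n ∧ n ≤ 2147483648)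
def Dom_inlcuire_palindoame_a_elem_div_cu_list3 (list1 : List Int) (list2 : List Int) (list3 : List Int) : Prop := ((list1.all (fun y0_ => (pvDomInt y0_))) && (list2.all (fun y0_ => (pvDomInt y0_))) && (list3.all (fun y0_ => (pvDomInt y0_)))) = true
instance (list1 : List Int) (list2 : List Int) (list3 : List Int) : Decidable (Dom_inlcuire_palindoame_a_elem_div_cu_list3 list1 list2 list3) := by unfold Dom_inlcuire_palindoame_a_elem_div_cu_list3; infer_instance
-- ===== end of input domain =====

-- B replaces A's inner scan over list3 (per element) by a precomputed lcm of the
-- divisors, so each element needs a single divisibility test; digit reversal is a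
-- tail recursion instead of A's while loop.  Objective: faster (asymptotic).

-- ===== PORT A =====
-- while nr > 0: oglindit = oglindit*10 + nr%10; nr = nr//10
def get_oglindit_loop (nr oglindit : Int) : Int :=
  if h : 0 < nr then
    get_oglindit_loop (PySem.Int.floordiv nr 10) (oglindit * 10 + PySem.Int.mod nr 10)
  else oglindit
termination_by nr.toNat
decreasing_by
  rw [PySem.Int.floordiv_eq_ediv_of_pos (by norm_num : (0:Int) < 10)]
  omega

def get_oglindit (nr : Int) : Int := get_oglindit_loop nr 0

def inlcuire_palindoame_a_elem_div_cu_list3 (list1 : List Int) (list2 : List Int) (list3 : List Int) : List Int × List Int :=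
  let result_list1 := (PySem.List.pyRange 0 (list1.length : Int) 1).foldl (fun acc i =>
    let dev := (PySem.List.pyRange 0 (list3.length : Int) 1).foldl (fun dev j =>
      if PySem.Int.mod (PySem.List.pyGetD list1 i 0) (PySem.List.pyGetD list3 j 0) ≠ 0 then false else dev) true
    if dev = true then acc ++ [get_oglindit (PySem.List.pyGetD list1 i 0)]
    else acc ++ [PySem.List.pyGetD list1 i 0]) []
  let result_list2 := (PySem.List.pyRange 0 (list2.length : Int) 1).foldl (fun acc i =>
    let dev := (PySem.List.pyRange 0 (list3.length : Int) 1).foldl (fun dev j =>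
      if PySem.Int.mod (PySem.List.pyGetD list2 i 0) (PySem.List.pyGetD list3 j 0) ≠ 0 then false else dev) true
    if dev = true then acc ++ [get_oglindit (PySem.List.pyGetD list2 i 0)]
    else acc ++ [PySem.List.pyGetD list2 i 0]) []
  (result_list1, result_list2)

-- ===== PORT B =====
-- while b: a, b = b, a % b
def pyGcd (a b : Int) : Int :=
  if h : b ≠ 0 then pyGcd b (PySem.Int.mod a b) else a
termination_by b.natAbs
decreasing_by
  rcases lt_or_gt_of_ne h with hb | hb
  · have := PySem.Int.mod_neg_bounds a hb
    omega
  · have h1 := PySem.Int.mod_nonneg a hb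
    have h2 := PySem.Int.mod_lt a hb
    omega

def pyRev (nr acc : Int) : Int :=
  if h : nr ≤ 0 then acc
  else pyRev (PySem.Int.floordiv nr 10) (acc * 10 + PySem.Int.mod nr 10)
termination_by nr.toNat
decreasing_by
  rw [PySem.Int.floordiv_eq_ediv_of_pos (by norm_num : (0:Int) < 10)]
  omega

def inlcuire_palindoame_a_elem_div_cu_list3_alt (list1 : List Int) (list2 : List Int) (list3 : List Int) : List Int × List Int :=
  let l := list3.foldl (fun l d =>
    let d := |d|
    if d ≠ 0 then PySem.Int.floordiv (l * d) (pyGcd l d) else 0) 1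
  let conv := fun x => if PySem.Int.mod x l = 0 then pyRev x 0 else x
  (list1.map conv, list2.map conv)

-- ===== PRECONDITION & SPEC =====
-- Pre_ excludes exactly the inputs where Python A raises ZeroDivisionError:
-- a 0 among the divisors while some element of list1/list2 is actually tested.
def Pre_inlcuire_palindoame_a_elem_div_cu_list3 (list1 : List Int) (list2 : List Int) (list3 : List Int) : Prop :=
  (0 : Int) ∈ list3 → (list1 = [] ∧ list2 = [])
instance (list1 : List Int) (list2 : List Int) (list3 : List Int) : Decidable (Pre_inlcuire_palindoame_a_elem_div_cu_list3 list1 list2 list3) := by unfold Pre_inlcuire_palindoame_a_elem_div_cu_list3; infer_instance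

def pvWitness_inlcuire_palindoame_a_elem_div_cu_list3 : List Int × List Int × List Int := ([12, 7, -6], [30], [2, 3])

def Spec_inlcuire_palindoame_a_elem_div_cu_list3 (list1 : List Int) (list2 : List Int) (list3 : List Int) (out : List Int × List Int) : Prop := out = inlcuire_palindoame_a_elem_div_cu_list3_alt list1 list2 list3
instance (list1 : List Int) (list2 : List Int) (list3 : List Int) (out : List Int × List Int) : Decidable (Spec_inlcuire_palindoame_a_elem_div_cu_list3 list1 list2 list3 out) := by unfold Spec_inlcuire_palindoame_a_elem_div_cu_list3; infer_instance

-- ===== CLAIM (what is proved, stated in full; the proofs are below) =====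
def Claim_equal_inlcuire_palindoame_a_elem_div_cu_list3 : Prop := ∀ (list1 : List Int) (list2 : List Int) (list3 : List Int), Dom_inlcuire_palindoame_a_elem_div_cu_list3 list1 list2 list3 → Pre_inlcuire_palindoame_a_elem_div_cu_list3 list1 list2 list3 → Spec_inlcuire_palindoame_a_elem_div_cu_list3 list1 list2 list3 (inlcuire_palindoame_a_elem_div_cu_list3 list1 list2 list3)

-- ===== LEMMAS AND PROOFS =====

-- B's tail-recursive digit reversal is A's while loop.
theorem pyRev_eq_loop (nr acc : Int) : pyRev nr acc = get_oglindit_loop nr acc := by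
  fun_induction pyRev with
  | case1 nr acc h => rw [get_oglindit_loop, dif_neg (by omega : ¬ (0:Int) < nr)]
  | case2 nr acc h ih =>
      rw [get_oglindit_loop, dif_pos (by omega : (0:Int) < nr)]
      exact ih

-- the hand-written Euclid loop computes Int.gcd on nonnegative arguments
theorem pyGcd_eq_gcd (a b : Int) (ha : 0 ≤ a) (hb : 0 ≤ b) : pyGcd a b = (Int.gcd a b : Int) := by
  fun_induction pyGcd with
  | case1 a b h ih =>
      have hbpos : 0 < b := lt_of_le_of_ne hb (Ne.symm h)
      rw [PySem.Int.mod_eq_emod_of_pos (a := a) hbpos] at ih ⊢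
      rw [ih hb (Int.emod_nonneg a (by omega)), Int.gcd_comm, Int.gcd_emod]
  | case2 a b h => simp at h; simp [h, Int.natAbs_of_nonneg ha]

theorem coe_lcm_dvd_iff (l a x : Int) : ((Int.lcm l a : Int) ∣ x) ↔ l ∣ x ∧ a ∣ x :=
  ⟨fun h => ⟨(Int.dvd_lcm_left l a).trans h, (Int.dvd_lcm_right l a).trans h⟩,
   fun ⟨h1, h2⟩ => Int.coe_lcm_dvd h1 h2⟩

-- B's lcm accumulator: positivity and the divisibility characterisation
theorem lcmFold_spec (l3 : List Int) (h3 : (0:Int) ∉ l3) : ∀ l : Int, 0 < l →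
    0 < l3.foldl (fun l d => let d := |d|; if d ≠ 0 then PySem.Int.floordiv (l * d) (pyGcd l d) else 0) l ∧
    ∀ x : Int, (l3.foldl (fun l d => let d := |d|; if d ≠ 0 then PySem.Int.floordiv (l * d) (pyGcd l d) else 0) l ∣ x ↔ l ∣ x ∧ ∀ d ∈ l3, d ∣ x) := by
  induction l3 with
  | nil => intro l hl; simpa using hl
  | cons d t ih =>
      intro l hl
      have hd : d ≠ 0 := fun hd => h3 (hd ▸ List.mem_cons_self ..)
      have ha : (0:Int) < |d| := abs_pos.mpr hd
      have hg : pyGcd l |d| = (Int.gcd l |d| : Int) := pyGcd_eq_gcd _ _ hl.le ha.le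
      have hgpos : (0:Int) < (Int.gcd l |d| : Int) := by
        have : Int.gcd l |d| ≠ 0 := by simp [Int.gcd_eq_zero_iff]; omega
        omega
      have hmul : ((Int.gcd l |d| : Int)) * (Int.lcm l |d| : Int) = l * |d| := by
        have h2 : ((Int.gcd l |d| * Int.lcm l |d| : Nat) : Int)
            = ((l.natAbs * (|d|).natAbs : Nat) : Int) := by
          exact_mod_cast congrArg (Nat.cast : Nat → Int) (Int.gcd_mul_lcm l |d|)
        push_cast at h2
        rw [abs_of_pos hl, abs_of_pos ha] at h2
        exact h2
      have hstep : PySem.Int.floordiv (l * |d|) (pyGcd l |d|) = (Int.lcm l |d| : Int) := by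
        rw [hg, PySem.Int.floordiv_eq_ediv_of_pos hgpos, ← hmul,
          Int.mul_ediv_cancel_left _ (ne_of_gt hgpos)]
      have hlcmpos : (0:Int) < (Int.lcm l |d| : Int) := by
        nlinarith [mul_pos hl ha]
      obtain ⟨hpos, hiff⟩ := ih (fun h => h3 (List.mem_cons_of_mem _ h)) _ hlcmpos
      have hfold : (d :: t).foldl (fun l d => let d := |d|; if d ≠ 0 then PySem.Int.floordiv (l * d) (pyGcd l d) else 0) l
          = t.foldl (fun l d => let d := |d|; if d ≠ 0 then PySem.Int.floordiv (l * d) (pyGcd l d) else 0) ((Int.lcm l |d| : Int)) := by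
        rw [List.foldl_cons]
        simp only [ne_of_gt ha, ne_eq, not_false_iff, if_pos, hstep]
      rw [hfold]
      refine ⟨hpos, fun x => ?_⟩
      rw [hiff x, coe_lcm_dvd_iff, abs_dvd]
      simp only [List.mem_cons]
      constructor
      · rintro ⟨⟨h1, h2⟩, h3⟩
        exact ⟨h1, fun e he => he.elim (fun h => h ▸ h2) (h3 e)⟩
      · rintro ⟨h1, h2⟩
        exact ⟨⟨h1, h2 d (Or.inl rfl)⟩, fun e he => h2 e (Or.inr he)⟩

-- A's inner flag loop over list3 is the conjunction of the divisibility tests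
theorem devFold_eq (x : Int) (l3 : List Int) : ∀ b : Bool,
    l3.foldl (fun dev d => if PySem.Int.mod x d ≠ 0 then false else dev) b
      = (b && l3.all (fun d => PySem.Int.mod x d == 0)) := by
  induction l3 with
  | nil => intro b; simp
  | cons d t ih =>
      intro b
      rw [List.foldl_cons, ih]
      by_cases h : PySem.Int.mod x d = 0 <;> simp [h]

-- A's per-list loop, as a map over the list
theorem procA_eq_map (xs l3 : List Int) :
    (PySem.List.pyRange 0 (xs.length : Int) 1).foldl (fun acc i =>
      let dev := (PySem.List.pyRange 0 (l3.length : Int) 1).foldl (fun dev j =>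
        if PySem.Int.mod (PySem.List.pyGetD xs i 0) (PySem.List.pyGetD l3 j 0) ≠ 0 then false else dev) true
      if dev = true then acc ++ [get_oglindit (PySem.List.pyGetD xs i 0)]
      else acc ++ [PySem.List.pyGetD xs i 0]) []
    = xs.map (fun x =>
        if (l3.foldl (fun dev d => if PySem.Int.mod x d ≠ 0 then false else dev) true) = true
        then get_oglindit x else x) := by
  have h1 := PySem.List.foldl_pyRange_zero_pyGetD' xs 0 (fun (acc : List Int) (x : Int) =>
      let dev := (PySem.List.pyRange 0 (l3.length : Int) 1).foldl (fun dev j =>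
        if PySem.Int.mod x (PySem.List.pyGetD l3 j 0) ≠ 0 then false else dev) true
      if dev = true then acc ++ [get_oglindit x] else acc ++ [x]) []
  rw [h1]
  have h2 : ∀ x : Int, (PySem.List.pyRange 0 (l3.length : Int) 1).foldl (fun dev j =>
      if PySem.Int.mod x (PySem.List.pyGetD l3 j 0) ≠ 0 then false else dev) true
      = l3.foldl (fun dev d => if PySem.Int.mod x d ≠ 0 then false else dev) true := fun x =>
    PySem.List.foldl_pyRange_zero_pyGetD' l3 0 (fun (dev : Bool) (d : Int) =>
      if PySem.Int.mod x d ≠ 0 then false else dev) true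
  have h3 : (fun (acc : List Int) (x : Int) =>
      let dev := (PySem.List.pyRange 0 (l3.length : Int) 1).foldl (fun dev j =>
        if PySem.Int.mod x (PySem.List.pyGetD l3 j 0) ≠ 0 then false else dev) true
      if dev = true then acc ++ [get_oglindit x] else acc ++ [x])
      = (fun (acc : List Int) (x : Int) => acc ++ [if (l3.foldl (fun dev d =>
          if PySem.Int.mod x d ≠ 0 then false else dev) true) = true then get_oglindit x else x]) := by
    funext acc x
    rw [h2 x]
    by_cases hx : (l3.foldl (fun dev d => if PySem.Int.mod x d ≠ 0 then false else dev) true) = true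
    · rw [if_pos hx, if_pos hx]
    · rw [if_neg hx, if_neg hx]
  rw [h3, PySem.List.foldl_append_singleton_eq_map, List.nil_append]

-- per element, with no zero divisor: A's converted value is B's
theorem elem_eq (l3 : List Int) (h0 : (0:Int) ∉ l3) (x : Int) :
    (if (l3.foldl (fun dev d => if PySem.Int.mod x d ≠ 0 then false else dev) true) = true
     then get_oglindit x else x)
    = (if PySem.Int.mod x (l3.foldl (fun l d => let d := |d|;
          if d ≠ 0 then PySem.Int.floordiv (l * d) (pyGcd l d) else 0) 1) = 0
       then pyRev x 0 else x) := by
  obtain ⟨hLpos, hiff⟩ := lcmFold_spec l3 h0 1 one_pos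
  have hcond : ((l3.foldl (fun dev d => if PySem.Int.mod x d ≠ 0 then false else dev) true) = true)
      ↔ (PySem.Int.mod x (l3.foldl (fun l d => let d := |d|;
          if d ≠ 0 then PySem.Int.floordiv (l * d) (pyGcd l d) else 0) 1) = 0) := by
    rw [devFold_eq, PySem.Int.mod_eq_zero_iff_dvd, hiff x, Bool.true_and, List.all_eq_true]
    constructor
    · intro h
      exact ⟨one_dvd x, fun d hd => (PySem.Int.mod_eq_zero_iff_dvd x d).mp (by simpa using h d hd)⟩
    · rintro ⟨-, h⟩ d hd
      simpa using (PySem.Int.mod_eq_zero_iff_dvd x d).mpr (h d hd)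
  rw [pyRev_eq_loop]
  by_cases h : (l3.foldl (fun dev d => if PySem.Int.mod x d ≠ 0 then false else dev) true) = true
  · rw [if_pos h, if_pos (hcond.mp h)]; rfl
  · rw [if_neg h, if_neg (fun hc => h (hcond.mpr hc))]

-- ===== VERDICT (by name: the statement is the Claim_ definition above) =====
theorem inlcuire_palindoame_a_elem_div_cu_list3_spec : Claim_equal_inlcuire_palindoame_a_elem_div_cu_list3 := by
  intro list1 list2 list3 _ hpre
  unfold Spec_inlcuire_palindoame_a_elem_div_cu_list3
  unfold inlcuire_palindoame_a_elem_div_cu_list3 inlcuire_palindoame_a_elem_div_cu_list3_alt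
  by_cases h0 : (0:Int) ∈ list3
  · obtain ⟨h1, h2⟩ := hpre h0
    subst h1; subst h2
    simp [PySem.List.pyRange_one_eq_nil (le_refl (0:Int))]
  · simp only [procA_eq_map]
    refine Prod.ext ?_ ?_ <;>
      exact List.map_congr_left (fun x _ => elem_eq list3 h0 x)
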